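-- pv_equiv track=rewrite | github.com/Fairber/- | 柱状图.py | get_part_price
-- ===== SOURCE A (Python) =====
-- def get_part_price(list):
--     list1=[]
--     list2=[]
--     list3=[]
--     list4=[]
--     list5=[]
--     list6=[]
--     list7=[]
--     count_list=[]
--     for price in list:
--         if price >= 3000 and price < 4000:
--             list1.append(price)
--         elif price>=4000 and price<5000:
--             list2.append(price)
--         elif price>=5000 and price<6000:
--             list3.append(price)
--         elif price>=6000 and price<7000:
--             list4.append(price)
--         elif price>=7000 and price<8000:
--             list5.append(price)
--         elif price>=8000 and price<9000:
--             list6.append(price)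
--         elif price>=9000 and price<10000:
--             list7.append(price)
--     count_list.append(len(list1))
--     count_list.append(len(list2))
--     count_list.append(len(list3))
--     count_list.append(len(list4))
--     count_list.append(len(list5))
--     count_list.append(len(list6))
--     count_list.append(len(list7))
--     return count_list
-- ===== SOURCE B (Python) =====
-- def get_part_price(list):
--     counts = [0] * 7
--     for price in list:
--         if 3000 <= price < 10000:
--             counts[(price - 3000) // 1000] += 1
--     return counts
-- ===== Notes on version B (the rewrite author's own statement) =====
-- stated objective: simpler
-- what changed: Replaces the seven intermediate lists and the if-elif cascade with a single counts array indexed by the computed bin (price-3000)//1000 behind one range guard.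
import Mathlib
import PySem

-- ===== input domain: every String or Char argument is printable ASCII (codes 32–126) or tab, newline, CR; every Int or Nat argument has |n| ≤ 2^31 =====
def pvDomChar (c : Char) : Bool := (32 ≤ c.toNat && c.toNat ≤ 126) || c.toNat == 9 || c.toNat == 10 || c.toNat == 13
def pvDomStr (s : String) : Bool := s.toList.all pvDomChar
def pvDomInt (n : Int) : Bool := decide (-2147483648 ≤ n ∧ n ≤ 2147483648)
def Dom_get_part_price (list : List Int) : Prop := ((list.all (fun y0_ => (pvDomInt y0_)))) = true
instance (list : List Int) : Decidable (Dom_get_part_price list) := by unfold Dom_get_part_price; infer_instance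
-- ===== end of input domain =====

-- B replaces A's seven intermediate lists and if-elif cascade with one counts array
-- indexed by the computed bin (price-3000)//1000 behind a single range guard (simpler).

-- ===== PORT A =====
-- one loop step: route price into one of the seven bucket lists (same branch order as A)
def pvStepA (s : List Int × List Int × List Int × List Int × List Int × List Int × List Int)
    (price : Int) : List Int × List Int × List Int × List Int × List Int × List Int × List Int :=
  let (l1, l2, l3, l4, l5, l6, l7) := s
  if 3000 ≤ price ∧ price < 4000 then (l1 ++ [price], l2, l3, l4, l5, l6, l7)
  else if 4000 ≤ price ∧ price < 5000 then (l1, l2 ++ [price], l3, l4, l5, l6, l7)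
  else if 5000 ≤ price ∧ price < 6000 then (l1, l2, l3 ++ [price], l4, l5, l6, l7)
  else if 6000 ≤ price ∧ price < 7000 then (l1, l2, l3, l4 ++ [price], l5, l6, l7)
  else if 7000 ≤ price ∧ price < 8000 then (l1, l2, l3, l4, l5 ++ [price], l6, l7)
  else if 8000 ≤ price ∧ price < 9000 then (l1, l2, l3, l4, l5, l6 ++ [price], l7)
  else if 9000 ≤ price ∧ price < 10000 then (l1, l2, l3, l4, l5, l6, l7 ++ [price])
  else (l1, l2, l3, l4, l5, l6, l7)

def get_part_price (list : List Int) : List Int :=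
  let s := list.foldl pvStepA ([], [], [], [], [], [], [])
  let (l1, l2, l3, l4, l5, l6, l7) := s
  [(l1.length : Int), l2.length, l3.length, l4.length, l5.length, l6.length, l7.length]

-- ===== PORT B =====
-- one loop step: counts[(price-3000)//1000] += 1 if price in range
-- (the index is in [0,7) whenever the guard holds, so Python's list indexing never raises;
--  List.getD/List.set realize the in-range read and write)
def pvStepB (counts : List Int) (price : Int) : List Int :=
  if 3000 ≤ price ∧ price < 10000 then
    let i := (PySem.Int.floordiv (price - 3000) 1000).toNat
    counts.set i (counts.getD i 0 + 1)
  else counts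

def get_part_price_alt (list : List Int) : List Int :=
  list.foldl pvStepB [0, 0, 0, 0, 0, 0, 0]

-- ===== PRECONDITION & SPEC =====
def Spec_get_part_price (list : List Int) (out : List Int) : Prop := out = get_part_price_alt list
instance (list : List Int) (out : List Int) : Decidable (Spec_get_part_price list out) := by unfold Spec_get_part_price; infer_instance

-- ===== CLAIM (what is proved, stated in full; the proofs are below) =====
def Claim_equal_get_part_price : Prop := ∀ (list : List Int), Dom_get_part_price list → Spec_get_part_price list (get_part_price list)

-- ===== LEMMAS AND PROOFS =====

-- the lengths-projection of A's bucket state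
def pvLens (s : List Int × List Int × List Int × List Int × List Int × List Int × List Int) : List Int :=
  [(s.1.length : Int), s.2.1.length, s.2.2.1.length, s.2.2.2.1.length,
   s.2.2.2.2.1.length, s.2.2.2.2.2.1.length, s.2.2.2.2.2.2.length]

theorem pvStep_comm (s : List Int × List Int × List Int × List Int × List Int × List Int × List Int)
    (p : Int) : pvStepB (pvLens s) p = pvLens (pvStepA s p) := by
  obtain ⟨l1, l2, l3, l4, l5, l6, l7⟩ := s
  simp only [pvStepA]
  by_cases h1 : 3000 ≤ p ∧ p < 4000
  · have hi : (PySem.Int.floordiv (p - 3000) 1000).toNat = 0 := by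
      rw [PySem.Int.floordiv_eq_ediv_of_pos (by omega)]; omega
    simp only [pvStepB, hi, pvLens]
    rw [if_pos (show (3000:Int) ≤ p ∧ p < 10000 by omega), if_pos h1]
    simp
  by_cases h2 : 4000 ≤ p ∧ p < 5000
  · have hi : (PySem.Int.floordiv (p - 3000) 1000).toNat = 1 := by
      rw [PySem.Int.floordiv_eq_ediv_of_pos (by omega)]; omega
    simp only [pvStepB, hi, pvLens]
    rw [if_pos (show (3000:Int) ≤ p ∧ p < 10000 by omega), if_pos h2, if_neg h1]
    simp
  by_cases h3 : 5000 ≤ p ∧ p < 6000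
  · have hi : (PySem.Int.floordiv (p - 3000) 1000).toNat = 2 := by
      rw [PySem.Int.floordiv_eq_ediv_of_pos (by omega)]; omega
    simp only [pvStepB, hi, pvLens]
    rw [if_pos (show (3000:Int) ≤ p ∧ p < 10000 by omega), if_pos h3, if_neg h1, if_neg h2]
    simp
  by_cases h4 : 6000 ≤ p ∧ p < 7000
  · have hi : (PySem.Int.floordiv (p - 3000) 1000).toNat = 3 := by
      rw [PySem.Int.floordiv_eq_ediv_of_pos (by omega)]; omega
    simp only [pvStepB, hi, pvLens]
    rw [if_pos (show (3000:Int) ≤ p ∧ p < 10000 by omega), if_pos h4, if_neg h1, if_neg h2, if_neg h3]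
    simp
  by_cases h5 : 7000 ≤ p ∧ p < 8000
  · have hi : (PySem.Int.floordiv (p - 3000) 1000).toNat = 4 := by
      rw [PySem.Int.floordiv_eq_ediv_of_pos (by omega)]; omega
    simp only [pvStepB, hi, pvLens]
    rw [if_pos (show (3000:Int) ≤ p ∧ p < 10000 by omega), if_pos h5, if_neg h1, if_neg h2, if_neg h3, if_neg h4]
    simp
  by_cases h6 : 8000 ≤ p ∧ p < 9000
  · have hi : (PySem.Int.floordiv (p - 3000) 1000).toNat = 5 := by
      rw [PySem.Int.floordiv_eq_ediv_of_pos (by omega)]; omega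
    simp only [pvStepB, hi, pvLens]
    rw [if_pos (show (3000:Int) ≤ p ∧ p < 10000 by omega), if_pos h6, if_neg h1, if_neg h2, if_neg h3, if_neg h4, if_neg h5]
    simp
  by_cases h7 : 9000 ≤ p ∧ p < 10000
  · have hi : (PySem.Int.floordiv (p - 3000) 1000).toNat = 6 := by
      rw [PySem.Int.floordiv_eq_ediv_of_pos (by omega)]; omega
    simp only [pvStepB, hi, pvLens]
    rw [if_pos (show (3000:Int) ≤ p ∧ p < 10000 by omega), if_pos h7, if_neg h1, if_neg h2, if_neg h3, if_neg h4, if_neg h5, if_neg h6]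
    simp
  · simp only [pvStepB, pvLens]
    rw [if_neg (show ¬ ((3000:Int) ≤ p ∧ p < 10000) by omega), if_neg h1, if_neg h2, if_neg h3, if_neg h4, if_neg h5, if_neg h6, if_neg h7]

theorem pvFold_comm (list : List Int)
    (s : List Int × List Int × List Int × List Int × List Int × List Int × List Int) :
    list.foldl pvStepB (pvLens s) = pvLens (list.foldl pvStepA s) := by
  induction list generalizing s with
  | nil => rfl
  | cons p rest ih => simp only [List.foldl_cons, pvStep_comm]; exact ih _

-- ===== VERDICT (by name: the statement is the Claim_ definition above) =====
theorem get_part_price_spec : Claim_equal_get_part_price := by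
  intro list _
  unfold Spec_get_part_price get_part_price get_part_price_alt
  have := pvFold_comm list ([], [], [], [], [], [], [])
  simp only [pvLens] at this
  rw [show ([0, 0, 0, 0, 0, 0, 0] : List Int) =
      pvLens ([], [], [], [], [], [], []) from rfl, pvFold_comm]
  obtain ⟨l1, l2, l3, l4, l5, l6, l7⟩ := list.foldl pvStepA ([], [], [], [], [], [], [])
  rfl
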